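-- pv_equiv track=rewrite | github.com/PauloViniciusBaleeiro/Uri---Online | 1079.py | atribuiPeso
-- ===== SOURCE A (Python) =====
-- def atribuiPeso(lista):
--     novaLista = []
--     for x in range(len(lista)):
--         if x == 0:
--             n = lista[x] * 2
--         elif x == 1:
--             n = lista[x] * 3
--         else:
--             n = lista[x] * 5
--         novaLista.append(n)
--     return novaLista
-- ===== SOURCE B (Python) =====
-- def atribuiPeso(lista):
--     # Bulk pass: weight 5 everywhere; then arithmetically correct the first
--     # two slots (2 = 5 - 3, 3 = 5 - 2), so no per-position weight is chosen.
--     res = [5 * x for x in lista]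
--     if len(res) >= 1:
--         res[0] -= 3 * lista[0]
--     if len(res) >= 2:
--         res[1] -= 2 * lista[1]
--     return res
-- ===== Notes on version B (the rewrite author's own statement) =====
-- stated objective: alternative
-- what changed: Instead of selecting a weight per position, B multiplies every element by 5 in one uniform pass and then arithmetically corrects the first two entries in place by subtraction (res[0]-=3*x0, res[1]-=2*x1).
import Mathlib
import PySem

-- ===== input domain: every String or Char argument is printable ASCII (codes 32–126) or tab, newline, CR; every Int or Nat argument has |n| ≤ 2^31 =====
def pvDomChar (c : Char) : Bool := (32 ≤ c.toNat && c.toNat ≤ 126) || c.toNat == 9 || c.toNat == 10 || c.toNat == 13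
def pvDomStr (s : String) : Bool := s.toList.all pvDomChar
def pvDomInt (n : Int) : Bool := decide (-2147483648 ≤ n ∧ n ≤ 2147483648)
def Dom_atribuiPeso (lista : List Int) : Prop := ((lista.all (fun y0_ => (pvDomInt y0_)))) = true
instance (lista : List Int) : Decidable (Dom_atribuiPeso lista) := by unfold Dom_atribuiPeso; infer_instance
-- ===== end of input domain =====

-- B replaces A's per-index weight branch by a uniform multiply-by-5 pass followed by in-place subtraction corrections to the first two entries (alternative decomposition; same cost).


-- ===== PORT A =====
-- for x in range(len(lista)): branch on x, append lista[x] * weight.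
-- lista[x] is always in range here, so getD's default 0 is never used.
def atribuiPeso (lista : List Int) : List Int :=
  (List.range lista.length).foldl
    (fun novaLista x =>
      novaLista ++
        [if x = 0 then lista.getD x 0 * 2
         else if x = 1 then lista.getD x 0 * 3
         else lista.getD x 0 * 5]) []

-- ===== PORT B =====
-- res = [5*x for x in lista]; if len>=1: res[0] -= 3*lista[0]; if len>=2: res[1] -= 2*lista[1]
def atribuiPeso_alt (lista : List Int) : List Int :=
  let res := lista.map (fun x => 5 * x)
  let res := if 1 ≤ res.length then res.set 0 (res.getD 0 0 - 3 * lista.getD 0 0) else res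
  let res := if 2 ≤ res.length then res.set 1 (res.getD 1 0 - 2 * lista.getD 1 0) else res
  res

-- ===== PRECONDITION & SPEC =====
def Spec_atribuiPeso (lista : List Int) (out : List Int) : Prop := out = atribuiPeso_alt lista
instance (lista : List Int) (out : List Int) : Decidable (Spec_atribuiPeso lista out) := by unfold Spec_atribuiPeso; infer_instance

-- ===== CLAIM =====
def Claim_equal_atribuiPeso : Prop := ∀ (lista : List Int), Dom_atribuiPeso lista → Spec_atribuiPeso lista (atribuiPeso lista)

-- ===== LEMMAS AND PROOFS =====

-- appending fold over a list is the accumulator ++ map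
theorem pv_foldl_append_map {α β : Type} (f : α → β) (l : List α) (acc : List β) :
    l.foldl (fun nova x => nova ++ [f x]) acc = acc ++ l.map f := by
  induction l generalizing acc with
  | nil => simp
  | cons a t ih => simp [List.foldl, ih]

theorem pv_a_eq_map (lista : List Int) :
    atribuiPeso lista =
      (List.range lista.length).map
        (fun x => if x = 0 then lista.getD x 0 * 2
                  else if x = 1 then lista.getD x 0 * 3
                  else lista.getD x 0 * 5) := by
  simpa [atribuiPeso] using
    pv_foldl_append_map
      (fun x => if x = 0 then lista.getD x 0 * 2
                else if x = 1 then lista.getD x 0 * 3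
                else lista.getD x 0 * 5)
      (List.range lista.length) []

-- ===== VERDICT =====
theorem atribuiPeso_spec : Claim_equal_atribuiPeso := by
  intro lista _
  show atribuiPeso lista = atribuiPeso_alt lista
  rw [pv_a_eq_map]
  apply List.ext_getElem
  · simp [atribuiPeso_alt]
    split_ifs <;> simp
  · intro i h1 h2
    have hi : i < lista.length := by simpa using h1
    have hget : lista.getD i 0 = lista[i] := List.getD_eq_getElem lista 0 hi
    simp only [List.getElem_map, List.getElem_range]
    simp only [atribuiPeso_alt, List.length_map]
    rcases Nat.lt_or_ge i 2 with h | h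
    · interval_cases i
      · have h1' : 1 ≤ lista.length := by omega
        by_cases h2' : 2 ≤ lista.length <;>
          simp [h1', h2', List.getD, List.getElem?_eq_getElem hi] <;> ring
      · have h1' : 1 ≤ lista.length := by omega
        have h2' : 2 ≤ lista.length := by omega
        have h0 : 0 < lista.length := by omega
        simp [h1', h2', List.getD, List.getElem?_eq_getElem hi, List.getElem?_eq_getElem h0]
        ring
    · have h0 : ¬ i = 0 := by omega
      have h1'' : ¬ i = 1 := by omega
      have hl1 : 1 ≤ lista.length := by omega
      have hl2 : 2 ≤ lista.length := by omega
      have h0' : ¬ (0 = i) := fun e => h0 e.symm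
      have h1s : ¬ (1 = i) := fun e => h1'' e.symm
      simp [h0, h1'', h0', h1s, hl1, hl2, List.getElem_set, List.getElem?_eq_getElem hi, mul_comm]
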